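-- pv_equiv track=rewrite | github.com/Goodheart-Labs/anki-manager | examples/yeats_to_anki.py | parse_poem_to_cards
-- ===== SOURCE A (Python) =====
-- def parse_poem_to_cards(poem_text):
--     """Parse poem text into line-by-line cards."""
--     cards = []
--     lines = []
--
--     # First, collect all non-empty lines
--     for line in poem_text.strip().split('\n'):
--         line = line.strip()
--         if line:
--             lines.append(line)
--
--     # Create cards where each line leads to the next
--     for i in range(len(lines) - 1):
--         front = lines[i]
--         back = lines[i + 1]
--         cards.append((front, back))
--
--     return cards
-- ===== SOURCE B (Python) =====
-- def parse_poem_to_cards(poem_text):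
--     """Parse poem text into line-by-line cards (single pass carrying the previous line)."""
--     cards = []
--     prev = None
--     for raw in poem_text.strip().split('\n'):
--         line = raw.strip()
--         if line:
--             if prev is not None:
--                 cards.append((prev, line))
--             prev = line
--     return cards
-- ===== Notes on version B (the rewrite author's own statement) =====
-- stated objective: simpler
-- what changed: Replaces A's build-a-list-then-index-pair two-phase structure with one pass over the split lines that carries the previous non-empty line and emits each pair immediately, dropping the staging list and the index loop.
import Mathlib
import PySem

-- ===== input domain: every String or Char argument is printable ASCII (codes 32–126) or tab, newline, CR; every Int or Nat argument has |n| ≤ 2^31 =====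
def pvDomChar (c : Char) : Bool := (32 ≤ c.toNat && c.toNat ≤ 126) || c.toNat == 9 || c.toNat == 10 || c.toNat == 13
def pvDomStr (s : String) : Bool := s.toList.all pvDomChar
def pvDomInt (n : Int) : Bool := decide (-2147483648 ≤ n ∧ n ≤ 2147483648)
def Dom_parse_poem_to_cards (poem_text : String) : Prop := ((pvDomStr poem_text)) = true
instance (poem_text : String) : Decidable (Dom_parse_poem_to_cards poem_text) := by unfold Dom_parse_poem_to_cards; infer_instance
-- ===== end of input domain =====

-- B is a single pass carrying the previous non-empty line, instead of A's
-- build-a-list-then-pair-by-index two-phase structure; return values proved equal.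

-- ===== PORT A =====
def parse_poem_to_cards (poem_text : String) : List (String × String) :=
  -- first loop: collect all non-empty stripped lines
  let lines : List String :=
    ((PySem.Str.split? (PySem.Str.strip poem_text) "\n").getD []).foldl
      (fun acc raw =>
        let line := PySem.Str.strip raw
        if line ≠ "" then acc ++ [line] else acc) []
  -- second loop: for i in range(len(lines) - 1): cards.append((lines[i], lines[i+1]))
  (PySem.List.pyRange 0 ((lines.length : Int) - 1) 1).foldl
    (fun cards i =>
      let front := PySem.List.pyGetD lines i ""
      let back := PySem.List.pyGetD lines (i + 1) ""
      cards ++ [(front, back)]) []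

-- ===== PORT B =====
-- loop body of B's single pass: state = (previous non-empty line seen, cards so far)
def pvAltStep (st : Option String × List (String × String)) (raw : String) :
    Option String × List (String × String) :=
  let line := PySem.Str.strip raw
  if line ≠ "" then
    match st.1 with
    | some p => (some line, st.2 ++ [(p, line)])
    | none   => (some line, st.2)
  else st

def parse_poem_to_cards_alt (poem_text : String) : List (String × String) :=
  (((PySem.Str.split? (PySem.Str.strip poem_text) "\n").getD []).foldl pvAltStep (none, [])).2

-- ===== PRECONDITION & SPEC =====
def Spec_parse_poem_to_cards (poem_text : String) (out : List (String × String)) : Prop := out = parse_poem_to_cards_alt poem_text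
instance (poem_text : String) (out : List (String × String)) : Decidable (Spec_parse_poem_to_cards poem_text out) := by unfold Spec_parse_poem_to_cards; infer_instance

-- ===== CLAIM (what is proved, stated in full; the proofs are below) =====
def Claim_equal_parse_poem_to_cards : Prop := ∀ (poem_text : String), Dom_parse_poem_to_cards poem_text → Spec_parse_poem_to_cards poem_text (parse_poem_to_cards poem_text)

-- ===== LEMMAS AND PROOFS =====

-- the stripped non-empty lines of a raw line list
def pvLines (xs : List String) : List String :=
  (xs.filter (fun r => PySem.Str.strip r ≠ "")).map PySem.Str.strip

lemma pvLines_cons (r : String) (xs : List String) :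
    pvLines (r :: xs) =
      if PySem.Str.strip r ≠ "" then PySem.Str.strip r :: pvLines xs else pvLines xs := by
  simp [pvLines, List.filter_cons]
  split_ifs <;> simp_all

-- A's first loop builds exactly pvLines
lemma a_lines (xs : List String) (acc : List String) :
    xs.foldl (fun acc raw =>
        let line := PySem.Str.strip raw
        if line ≠ "" then acc ++ [line] else acc) acc = acc ++ pvLines xs := by
  induction xs generalizing acc with
  | nil => simp [pvLines]
  | cons r xs ih =>
    by_cases h : PySem.Str.strip r = ""
    · simp only [List.foldl_cons, pvLines_cons, h]
      simpa using ih acc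
    · simp only [List.foldl_cons, pvLines_cons, ne_eq, h, not_false_eq_true, if_true]
      rw [ih]
      simp

-- appending-one foldl is a map
lemma foldl_append_map {α β : Type} (g : α → β) (l : List α) (acc : List β) :
    l.foldl (fun acc x => acc ++ [g x]) acc = acc ++ l.map g := by
  induction l generalizing acc with
  | nil => simp
  | cons x xs ih => simp [ih]

-- A's index loop over range(len l - 1) produces the adjacent pairs l.zip l.tail
lemma a_pairs (l : List String) :
    (PySem.List.pyRange 0 ((l.length : Int) - 1) 1).foldl
      (fun cards i =>
        let front := PySem.List.pyGetD l i ""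
        let back := PySem.List.pyGetD l (i + 1) ""
        cards ++ [(front, back)]) []
      = l.zip l.tail := by
  rw [PySem.List.pyRange_one, List.foldl_map, foldl_append_map, List.nil_append]
  apply List.ext_getElem
  · simp
  · intro i h1 h2
    have hi : i < l.length - 1 := by simp at h1; omega
    have hi1 : i < l.length := by omega
    have hi2 : i + 1 < l.length := by omega
    simp only [List.getElem_map, List.getElem_range, List.getElem_zip, List.getElem_tail,
      zero_add]
    rw [show ((i : Int) + 1) = ((i + 1 : Nat) : Int) by push_cast; ring]
    rw [PySem.List.pyGetD_natCast, PySem.List.pyGetD_natCast,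
      List.getD_eq_getElem _ _ hi1, List.getD_eq_getElem _ _ hi2]

-- B's fold, started after a previous line p has been seen
lemma b_fold_some (xs : List String) (p : String) (acc : List (String × String)) :
    xs.foldl pvAltStep (some p, acc)
      = ((p :: pvLines xs).getLast?, acc ++ (p :: pvLines xs).zip (pvLines xs)) := by
  induction xs generalizing p acc with
  | nil => simp [pvLines]
  | cons r xs ih =>
    simp only [List.foldl_cons, pvAltStep, pvLines_cons]
    split_ifs with h
    · simp only [ih]
      rcases pvLines xs with _ | ⟨a, t⟩ <;> simp
    · simp [ih]

-- B's fold from the initial state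
lemma b_fold_none (xs : List String) :
    xs.foldl pvAltStep (none, [])
      = ((pvLines xs).getLast?, (pvLines xs).zip (pvLines xs).tail) := by
  induction xs with
  | nil => simp [pvLines]
  | cons r xs ih =>
    simp only [List.foldl_cons, pvAltStep, pvLines_cons]
    split_ifs with h
    · rw [b_fold_some]; simp
    · simpa using ih

-- ===== VERDICT (by name: the statement is the Claim_ definition above) =====
theorem parse_poem_to_cards_spec : Claim_equal_parse_poem_to_cards := by
  intro poem_text _
  unfold Spec_parse_poem_to_cards parse_poem_to_cards parse_poem_to_cards_alt
  rw [b_fold_none, a_lines]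
  simp only [List.nil_append]
  exact a_pairs _
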